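-- pv_equiv track=rewrite | github.com/hafidabid/tucil1stima | main.py | permutationEngine
-- ===== SOURCE A (Python) =====
-- def permutationEngine(arr,arrSize,tabungan=9):
--     if(arrSize==1):
--         if str(arr[0])!='0' and str(arr[1])!='0':
--             if int(arr[1])>tabungan:
--                 return []
--             else:
--                 return arr
--         else:
--             return []
--     else:
--         res = []
--         for y in range(arrSize):
--             res = res+permutationEngine(arr,arrSize-1,tabungan)
--             if(arrSize%2==1):
--                 arr[0],arr[arrSize-1] = arr[arrSize-1],arr[0]
--             else:
--                 arr[y],arr[arrSize-1] = arr[arrSize-1],arr[y]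
--
--         return res
-- ===== SOURCE B (Python) =====
-- def permutationEngine(arr, arrSize, tabungan=9):
--     # iterative simulation with an explicit frame stack instead of recursion;
--     # mutates arr with exactly the same swap sequence as the recursive version
--     def ok():
--         return arr[0] != 0 and arr[1] != 0 and arr[1] <= tabungan
--     if arrSize == 1:
--         return list(arr) if ok() else []
--     res = []
--     stack = [[arrSize, 0]]
--     while stack:
--         n, y = stack[-1]
--         if n != 1 and y < n:
--             stack.append([n - 1, 0])
--             continue
--         if n == 1 and ok():
--             res.extend(arr)
--         stack.pop()
--         if stack:
--             pn, py = stack[-1]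
--             if pn % 2 == 1:
--                 arr[0], arr[pn - 1] = arr[pn - 1], arr[0]
--             else:
--                 arr[py], arr[pn - 1] = arr[pn - 1], arr[py]
--             stack[-1][1] = py + 1
--     return res
-- ===== Notes on version B (the rewrite author's own statement) =====
-- stated objective: alternative
-- what changed: Replaces A's recursive permutation generator by an iterative while-loop over an explicit stack of (level, iterations-done) frames that performs the identical filter/emission/swap sequence (including the same in-place mutation of arr), extending a single result list instead of rebuilding it by concatenation at every recursion level.
import Mathlib
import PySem

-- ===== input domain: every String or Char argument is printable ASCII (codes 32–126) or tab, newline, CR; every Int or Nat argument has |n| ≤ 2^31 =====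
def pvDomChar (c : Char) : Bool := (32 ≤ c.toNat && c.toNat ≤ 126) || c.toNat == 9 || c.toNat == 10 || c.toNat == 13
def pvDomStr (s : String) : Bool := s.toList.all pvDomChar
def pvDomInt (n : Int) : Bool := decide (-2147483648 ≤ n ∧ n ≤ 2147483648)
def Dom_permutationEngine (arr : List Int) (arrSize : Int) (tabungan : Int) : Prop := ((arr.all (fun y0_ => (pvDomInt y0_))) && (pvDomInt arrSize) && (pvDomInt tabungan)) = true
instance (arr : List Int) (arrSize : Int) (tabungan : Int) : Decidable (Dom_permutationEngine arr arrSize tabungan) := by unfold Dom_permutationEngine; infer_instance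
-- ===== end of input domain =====

-- B replaces A's recursion by an explicit frame-stack loop (same swaps, same order, same
-- in-place mutation of arr); equivalence proved here is about the RETURN value only.

-- ===== PORT A =====
-- Python's tuple swap arr[i],arr[j] = arr[j],arr[i]; exact for in-range non-negative
-- indices (the only ones reachable under Pre_; Python raises IndexError otherwise).
-- Shared verbatim by both ports: both Pythons contain this identical swap snippet.
def pvSwap (a : List Int) (i j : Int) : List Int :=
  match PySem.List.pyGet? a i, PySem.List.pyGet? a j with
  | some vi, some vj => (a.set i.toNat vj).set j.toNat vi
  | _, _ => a

-- recursion of A on arrSize.toNat: the 0 case is Python's else-branch with an empty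
-- range loop (arrSize ≤ 0), the 1 case is Python's arrSize==1 base case.
def permA_go (tab : Int) (n : Nat) (arr : List Int) : List Int × List Int :=
  match n, arr with
  | 0, arr => ([], arr)
  | 1, arr =>
    match PySem.List.pyGet? arr 0, PySem.List.pyGet? arr 1 with
    | some a0, some a1 =>
      if PySem.Int.toStr a0 ≠ "0" ∧ PySem.Int.toStr a1 ≠ "0" then
        if a1 > tab then ([], arr) else (arr, arr)
      else ([], arr)
    | _, _ => ([], arr)
  | (m+2), arr =>
    (List.range (m+2)).foldl
      (fun (st : List Int × List Int) (y : Nat) =>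
        let pr := permA_go tab (m+1) st.2
        (st.1 ++ pr.1,
          if ((m : Int) + 2) % 2 == 1 then pvSwap pr.2 0 ((m : Int) + 2 - 1)
          else pvSwap pr.2 (y : Int) ((m : Int) + 2 - 1)))
      ([], arr)
termination_by n

def permutationEngine (arr : List Int) (arrSize : Int) (tabungan : Int) : List Int :=
  (permA_go tabungan arrSize.toNat arr).1

-- ===== PORT B =====
-- B's ok(): arr[0] != 0 and arr[1] != 0 and arr[1] <= tabungan (false default = the
-- IndexError case, excluded by Pre_)
def pvOk (arr : List Int) (tab : Int) : Bool :=
  match PySem.List.pyGet? arr 0, PySem.List.pyGet? arr 1 with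
  | some a0, some a1 => a0 != 0 && a1 != 0 && decide (a1 ≤ tab)
  | _, _ => false

-- B's while-loop over the explicit stack of frames (n, y); fuel only makes the loop
-- total in Lean (pvFuel below is exactly the number of iterations, proved sufficient).
def pvMachine (tab : Int) : Nat → List Int → List Int → List (Int × Int) → List Int
  | 0, res, _, _ => res
  | _+1, res, _, [] => res
  | f+1, res, arr, (n, y) :: rest =>
    if n ≠ 1 ∧ y < n then
      pvMachine tab f res arr ((n - 1, 0) :: (n, y) :: rest)
    else
      let res' := if n == 1 && pvOk arr tab then res ++ arr else res
      match rest with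
      | [] => pvMachine tab f res' arr []
      | (pn, py) :: rr =>
        let arr' := if pn % 2 == 1 then pvSwap arr 0 (pn - 1) else pvSwap arr py (pn - 1)
        pvMachine tab f res' arr' ((pn, py + 1) :: rr)

-- exact iteration count of the while-loop started on frame (n, 0)
def pvFuel : Nat → Nat
  | 0 => 1
  | 1 => 1
  | m+2 => (m + 2) * (1 + pvFuel (m + 1)) + 1

def permutationEngine_alt (arr : List Int) (arrSize : Int) (tabungan : Int) : List Int :=
  if arrSize == 1 then (if pvOk arr tabungan then arr else [])
  else pvMachine tabungan (pvFuel arrSize.toNat + 1) [] arr [(arrSize, 0)]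

-- ===== PRECONDITION & SPEC =====
-- Pre_ excludes exactly the inputs on which Python A raises IndexError: for arrSize ≥ 1
-- it needs len(arr) ≥ 2 (the arr[1] read in the base case) and arrSize ≤ len(arr) (the
-- swaps) — except that for arrSize == 1 with arr[0] == 0 the 'and' short-circuits before
-- the arr[1] read, so a 1-element list headed by 0 still returns (third disjunct).
def Pre_permutationEngine (arr : List Int) (arrSize : Int) (tabungan : Int) : Prop :=
  arrSize ≤ 0 ∨ (2 ≤ (arr.length : Int) ∧ arrSize ≤ (arr.length : Int))
    ∨ (arrSize = 1 ∧ arr.head? = some 0)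
instance (arr : List Int) (arrSize : Int) (tabungan : Int) : Decidable (Pre_permutationEngine arr arrSize tabungan) := by unfold Pre_permutationEngine; infer_instance
def pvWitness_permutationEngine : List Int × Int × Int := ([1, 2, 3], 3, 9)

def Spec_permutationEngine (arr : List Int) (arrSize : Int) (tabungan : Int) (out : List Int) : Prop := out = permutationEngine_alt arr arrSize tabungan
instance (arr : List Int) (arrSize : Int) (tabungan : Int) (out : List Int) : Decidable (Spec_permutationEngine arr arrSize tabungan out) := by unfold Spec_permutationEngine; infer_instance

-- ===== CLAIM (what is proved, stated in full; the proofs are below) =====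
def Claim_equal_permutationEngine : Prop := ∀ (arr : List Int) (arrSize : Int) (tabungan : Int), Dom_permutationEngine arr arrSize tabungan → Pre_permutationEngine arr arrSize tabungan → Spec_permutationEngine arr arrSize tabungan (permutationEngine arr arrSize tabungan)

-- ===== LEMMAS AND PROOFS =====

lemma pv_digitChar_eq_zero (d : Nat) (hd : d < 10) (h : Nat.digitChar d = '0') : d = 0 := by
  interval_cases d <;> revert h <;> decide

lemma pv_toDigitsCore_ne (f : Nat) : ∀ (n : Nat) (ds : List Char), n ≠ 0 → n < f →
    Nat.toDigitsCore 10 f n ds ≠ ['0'] := by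
  induction f with
  | zero => intro n ds hn hf; omega
  | succ f ih =>
    intro n ds hn hf h
    simp only [Nat.toDigitsCore] at h
    by_cases h10 : n / 10 = 0
    · rw [if_pos h10] at h
      simp only [List.cons.injEq] at h
      have := pv_digitChar_eq_zero (n % 10) (Nat.mod_lt _ (by norm_num)) h.1
      omega
    · rw [if_neg h10] at h
      exact ih (n / 10) _ h10 (by omega) h

lemma pv_toStr_eq_zero (n : Int) : PySem.Int.toStr n = "0" ↔ n = 0 := by
  constructor
  · intro h
    have h2 : PySem.Int.toChars n = ['0'] := by
      have h3 := congrArg String.toList h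
      rw [PySem.Int.toList_toStr] at h3
      simpa using h3
    unfold PySem.Int.toChars at h2
    by_cases hneg : n < 0
    · rw [if_pos hneg] at h2
      simp at h2
    · rw [if_neg hneg] at h2
      unfold Nat.toDigits at h2
      by_cases hz : n.toNat = 0
      · omega
      · exact absurd h2 (pv_toDigitsCore_ne (n.toNat + 1) n.toNat [] hz (by omega))
  · rintro rfl; decide

lemma pv_permA_one (tab : Int) (arr : List Int) :
    permA_go tab 1 arr = ((if pvOk arr tab then arr else []), arr) := by
  unfold permA_go pvOk
  cases h0 : PySem.List.pyGet? arr 0 with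
  | none => simp
  | some a0 =>
    cases h1 : PySem.List.pyGet? arr 1 with
    | none => simp
    | some a1 =>
      by_cases e0 : a0 = 0 <;> by_cases e1 : a1 = 0 <;> by_cases e2 : a1 ≤ tab <;>
        simp_all [pv_toStr_eq_zero]

-- loop body of A's level-(m+2) for-loop, as a named fold step
def pvStepA (tab : Int) (m : Nat) (st : List Int × List Int) (y : Nat) : List Int × List Int :=
  let pr := permA_go tab (m + 1) st.2
  (st.1 ++ pr.1,
    if ((m : Int) + 2) % 2 == 1 then pvSwap pr.2 0 ((m : Int) + 2 - 1)
    else pvSwap pr.2 (y : Int) ((m : Int) + 2 - 1))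

lemma pv_permA_two (tab : Int) (m : Nat) (arr : List Int) :
    permA_go tab (m+2) arr = (List.range (m+2)).foldl (pvStepA tab m) ([], arr) := by
  rw [permA_go]; rfl

lemma pv_foldl_acc (tab : Int) (m : Nat) : ∀ (l : List Nat) (r a),
    l.foldl (pvStepA tab m) (r, a)
      = (r ++ (l.foldl (pvStepA tab m) ([], a)).1, (l.foldl (pvStepA tab m) ([], a)).2) := by
  intro l
  induction l with
  | nil => intro r a; simp
  | cons y l ih =>
    intro r a
    simp only [List.foldl_cons]
    rw [show pvStepA tab m (r, a) y
        = (r ++ (pvStepA tab m ([], a) y).1, (pvStepA tab m ([], a) y).2) from by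
      simp [pvStepA]]
    rw [ih (r ++ (pvStepA tab m ([], a) y).1) (pvStepA tab m ([], a) y).2,
        ih (pvStepA tab m ([], a) y).1 (pvStepA tab m ([], a) y).2]
    simp [List.append_assoc]

-- what one pop iteration of the while-loop does after the popped frame is gone
def pvAfterPop (tab : Int) (f : Nat) (res arr : List Int) (rest : List (Int × Int)) : List Int :=
  match rest with
  | [] => pvMachine tab f res arr []
  | (pn, py) :: rr =>
    pvMachine tab f res (if pn % 2 == 1 then pvSwap arr 0 (pn - 1) else pvSwap arr py (pn - 1))
      ((pn, py + 1) :: rr)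

lemma pv_machine_push (tab : Int) (f : Nat) (res arr : List Int) (n y : Int)
    (rest : List (Int × Int)) (h : n ≠ 1 ∧ y < n) :
    pvMachine tab (f+1) res arr ((n, y) :: rest)
      = pvMachine tab f res arr ((n - 1, 0) :: (n, y) :: rest) := by
  simp [pvMachine, if_pos h]

lemma pv_machine_pop (tab : Int) (f : Nat) (res arr : List Int) (n y : Int)
    (rest : List (Int × Int)) (h : ¬ (n ≠ 1 ∧ y < n)) :
    pvMachine tab (f+1) res arr ((n, y) :: rest)
      = pvAfterPop tab f (if n == 1 && pvOk arr tab then res ++ arr else res) arr rest := by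
  cases rest with
  | nil => simp [pvMachine, if_neg h, pvAfterPop]
  | cons p rr => obtain ⟨pn, py⟩ := p; simp [pvMachine, if_neg h, pvAfterPop]

lemma pv_sim : ∀ (m : Nat) (tab : Int), 1 ≤ m → ∀ (f : Nat) (res arr : List Int)
    (rest : List (Int × Int)),
    pvMachine tab (pvFuel m + f) res arr (((m : Int), 0) :: rest)
      = pvAfterPop tab f (res ++ (permA_go tab m arr).1) (permA_go tab m arr).2 rest := by
  intro m
  induction m using Nat.strong_induction_on with
  | _ m IH =>
    match m with
    | 0 => intro tab hm; omega
    | 1 =>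
      intro tab _ f res arr rest
      have h1 : pvFuel 1 + f = f + 1 := Nat.add_comm 1 f
      rw [h1, Nat.cast_one, pv_machine_pop tab f res arr 1 0 rest (by omega)]
      rw [pv_permA_one]
      by_cases hok : pvOk arr tab <;> simp [hok]
    | (k+2) =>
      intro tab _ f res arr rest
      have IHk : ∀ (f : Nat) (res arr : List Int) (rest : List (Int × Int)),
          pvMachine tab (pvFuel (k+1) + f) res arr ((((k+1 : Nat) : Int), 0) :: rest)
            = pvAfterPop tab f (res ++ (permA_go tab (k+1) arr).1)
                (permA_go tab (k+1) arr).2 rest :=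
        fun f res arr rest => IH (k+1) (by omega) tab (by omega) f res arr rest
      have rounds : ∀ (j : Nat), ∀ (y : Nat), y + j = k + 2 → ∀ (f : Nat)
          (res arr : List Int) (rest : List (Int × Int)),
          pvMachine tab (j * (1 + pvFuel (k+1)) + 1 + f) res arr
              ((((k:Int) + 2), (y : Int)) :: rest)
            = pvAfterPop tab f
                (res ++ ((List.range' y j).foldl (pvStepA tab k) ([], arr)).1)
                ((List.range' y j).foldl (pvStepA tab k) ([], arr)).2 rest := by
        intro j
        induction j with
        | zero =>
          intro y hy f res arr rest
          have hy2 : y = k + 2 := by omega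
          subst hy2
          have hfuel : 0 * (1 + pvFuel (k+1)) + 1 + f = f + 1 := by omega
          rw [hfuel, pv_machine_pop tab f res arr _ _ rest (by push_cast; omega)]
          have hfalse : (((k:Int) + 2) == 1) = false := by simp; omega
          simp [hfalse]
        | succ j ihj =>
          intro y hy f res arr rest
          have hfuel : (j+1) * (1 + pvFuel (k+1)) + 1 + f
              = (pvFuel (k+1) + (j * (1 + pvFuel (k+1)) + 1 + f)) + 1 := by ring
          rw [hfuel, pv_machine_push tab _ res arr _ _ _
            ⟨by omega, by exact_mod_cast (by omega : (y:Int) < (k:Int) + 2)⟩]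
          have hc1 : ((k:Int) + 2 - 1) = (((k+1 : Nat)) : Int) := by push_cast; ring
          rw [hc1, IHk]
          simp only [pvAfterPop]
          have hc2 : ((y:Int) + 1) = (((y+1 : Nat)) : Int) := by push_cast; ring
          rw [hc2, ihj (y+1) (by omega)]
          rw [List.range'_succ, List.foldl_cons]
          rw [pv_foldl_acc tab k (List.range' (y+1) j)
            (pvStepA tab k ([], arr) y).1 (pvStepA tab k ([], arr) y).2]
          simp [pvStepA, List.append_assoc, hc1]
          cases rest with
          | nil => rfl
          | cons p rr => obtain ⟨pn, py⟩ := p; simp [pvAfterPop]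
      have hT : pvFuel (k+2) + f = (k+2) * (1 + pvFuel (k+1)) + 1 + f := by
        simp [pvFuel]
      have hcast : (((k+2 : Nat)) : Int) = (k:Int) + 2 := by push_cast; ring
      rw [hT, hcast, show (0 : Int) = ((0:Nat) : Int) from rfl,
        rounds (k+2) 0 (by omega) f res arr rest]
      rw [show List.range' 0 (k+2) = List.range (k+2) from List.range_eq_range'.symm,
        ← pv_permA_two]
-- ===== VERDICT (by name: the statement is the Claim_ definition above) =====
theorem permutationEngine_spec : Claim_equal_permutationEngine := by
  unfold Claim_equal_permutationEngine Spec_permutationEngine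
  intro arr arrSize tab _ _
  unfold permutationEngine permutationEngine_alt
  by_cases h1 : arrSize = 1
  · subst h1
    simp [pv_permA_one]
  · rw [if_neg (by simpa using h1)]
    by_cases hle : arrSize ≤ 0
    case pos =>
      have h0 : arrSize.toNat = 0 := by omega
      rw [h0]
      rw [show pvFuel 0 + 1 = 1 + 1 from rfl,
        pv_machine_pop tab 1 [] arr arrSize 0 [] (by omega)]
      have hfalse : ((arrSize : Int) == 1) = false := by simp; omega
      simp [hfalse, pvAfterPop, pvMachine, permA_go]
    case neg =>
      have h2 : 2 ≤ arrSize := by omega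
      obtain ⟨k, hk⟩ : ∃ k, arrSize.toNat = k + 2 := ⟨arrSize.toNat - 2, by omega⟩
      rw [hk]
      have hcast : (((k + 2 : Nat)) : Int) = arrSize := by omega
      rw [← hcast]
      rw [pv_sim (k+2) tab (by omega) 1 [] arr []]
      simp [pvAfterPop, pvMachine]
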